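-- pv_equiv track=rewrite | github.com/claudiajkang/DA-AR | Algorithms/Implementation/HR_flatland-space-stations.py | flatlandSpaceStations
-- ===== SOURCE A (Python) =====
-- def flatlandSpaceStations(n, c):
--     res = list()
--     c = sorted(c)
--
--     if n == len(c):
--         return 0
--
--     for i in range(len(c)):
--         if i == 0:
--             if 0 < c[i]:
--                 for j in range(0, c[i]):
--                     v = abs(j - c[i])
--                     res.append(v)
--             continue
--         else:
--             for j in range(c[i-1], c[i]):
--                 v1 = abs(j-c[i-1])
--                 v2 = abs(j-c[i])
--                 v = min(v1, v2)
--                 res.append(v)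
--
--     if c[-1] < n:
--         for j in range(c[-1], n):
--             v = abs(j - c[-1])
--             res.append(v)
--
--     return max(res)
-- ===== SOURCE B (Python) =====
-- def flatlandSpaceStations(n, c):
--     if n == len(c):
--         return 0
--     s = sorted(c)
--     cand = [(b - a) // 2 for a, b in zip(s, s[1:])]
--     if s[0] > 0:
--         cand.append(s[0])
--     if s[-1] < n:
--         cand.append(n - 1 - s[-1])
--     return max(cand)
-- ===== Notes on version B (the rewrite author's own statement) =====
-- stated objective: faster
-- what changed: B drops A's city-by-city distance scan (which builds a list with one entry per city in every covered interval) and computes the answer directly from the sorted stations: the max of s[0], half of each adjacent-station gap, and n-1-s[-1].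
import Mathlib
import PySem

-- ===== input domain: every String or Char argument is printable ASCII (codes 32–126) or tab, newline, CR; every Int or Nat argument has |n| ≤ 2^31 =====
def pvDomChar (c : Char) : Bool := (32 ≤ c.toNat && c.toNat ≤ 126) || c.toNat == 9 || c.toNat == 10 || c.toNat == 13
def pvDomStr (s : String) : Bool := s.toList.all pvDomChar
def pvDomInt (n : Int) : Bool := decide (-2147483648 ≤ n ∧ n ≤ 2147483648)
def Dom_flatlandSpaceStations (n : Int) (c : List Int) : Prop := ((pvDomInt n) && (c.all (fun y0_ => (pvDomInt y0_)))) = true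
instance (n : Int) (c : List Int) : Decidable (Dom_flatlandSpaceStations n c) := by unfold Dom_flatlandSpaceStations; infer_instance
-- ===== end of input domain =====

-- B replaces A's scan over every city by the closed form over sorted-station gaps:
-- max of s[0], (b-a)//2 for adjacent stations, n-1-s[-1].

-- ===== PORT A =====
def flatlandSpaceStations (n : Int) (c : List Int) : Int :=
  -- res = list(); c = sorted(c)
  let s := PySem.List.sorted c (fun x => x) false
  -- if n == len(c): return 0
  if n = (s.length : Int) then 0
  else
    -- for i in range(len(c)): …
    let res : List Int :=
      (PySem.List.pyRange 0 (s.length : Int) 1).foldl (fun res i =>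
        if i = 0 then
          if 0 < PySem.List.pyGetD s i 0 then
            (PySem.List.pyRange 0 (PySem.List.pyGetD s i 0) 1).foldl
              (fun res j => res ++ [|j - PySem.List.pyGetD s i 0|]) res
          else res
        else
          (PySem.List.pyRange (PySem.List.pyGetD s (i-1) 0) (PySem.List.pyGetD s i 0) 1).foldl
            (fun res j => res ++ [min |j - PySem.List.pyGetD s (i-1) 0| |j - PySem.List.pyGetD s i 0|]) res) []
    -- if c[-1] < n: …
    let res :=
      if PySem.List.pyGetD s (-1) 0 < n then
        (PySem.List.pyRange (PySem.List.pyGetD s (-1) 0) n 1).foldl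
          (fun res j => res ++ [|j - PySem.List.pyGetD s (-1) 0|]) res
      else res
    -- return max(res)   (max of the empty list raises ValueError: excluded by Pre_)
    (PySem.List.max? res (fun x => x)).getD 0

-- ===== PORT B =====
def flatlandSpaceStations_alt (n : Int) (c : List Int) : Int :=
  if n = (c.length : Int) then 0
  else
    let s := PySem.List.sorted c (fun x => x) false
    -- cand = [(b - a) // 2 for a, b in zip(s, s[1:])]
    let cand := (s.zip (s.drop 1)).map (fun p => PySem.Int.floordiv (p.2 - p.1) 2)
    let cand := if 0 < PySem.List.pyGetD s 0 0 then cand ++ [PySem.List.pyGetD s 0 0] else cand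
    let cand := if PySem.List.pyGetD s (-1) 0 < n then cand ++ [n - 1 - PySem.List.pyGetD s (-1) 0] else cand
    (PySem.List.max? cand (fun x => x)).getD 0

-- ===== PRECONDITION & SPEC =====
-- Pre_ excludes exactly the inputs on which Python A raises: c = [] with n ≠ 0 (IndexError on
-- c[-1]) and the all-equal lists whose value is ≤ 0 and ≥ n while n ≠ len(c), where 'res'
-- stays empty and max(res) raises ValueError.
def Pre_flatlandSpaceStations (n : Int) (c : List Int) : Prop :=
  (c = [] → n = 0) ∧
  (c ≠ [] → n = (c.length : Int) ∨ (∃ x ∈ c, 0 < x) ∨ (∃ x ∈ c, ∃ y ∈ c, x ≠ y) ∨ (∃ x ∈ c, x < n))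
instance (n : Int) (c : List Int) : Decidable (Pre_flatlandSpaceStations n c) := by
  unfold Pre_flatlandSpaceStations; infer_instance

def pvWitness_flatlandSpaceStations : Int × List Int := (9, [0, 4, 6])

def Spec_flatlandSpaceStations (n : Int) (c : List Int) (out : Int) : Prop := out = flatlandSpaceStations_alt n c
instance (n : Int) (c : List Int) (out : Int) : Decidable (Spec_flatlandSpaceStations n c out) := by unfold Spec_flatlandSpaceStations; infer_instance

-- ===== CLAIM (what is proved, stated in full; the proofs are below) =====
def Claim_equal_flatlandSpaceStations : Prop := ∀ (n : Int) (c : List Int), Dom_flatlandSpaceStations n c → Pre_flatlandSpaceStations n c → Spec_flatlandSpaceStations n c (flatlandSpaceStations n c)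


-- ===== LEMMAS AND PROOFS =====

def pvG (s : List Int) (i : Int) : Int := PySem.List.pyGetD s i 0

def pvSeg0 (s : List Int) : List Int :=
  if 0 < pvG s 0 then (PySem.List.pyRange 0 (pvG s 0) 1).map (fun j => |j - pvG s 0|) else []

def pvGap (s : List Int) (i : Int) : List Int :=
  (PySem.List.pyRange (pvG s (i-1)) (pvG s i) 1).map
    (fun j => min |j - pvG s (i-1)| |j - pvG s i|)

def pvSegR (n : Int) (s : List Int) : List Int :=
  if pvG s (-1) < n then (PySem.List.pyRange (pvG s (-1)) n 1).map (fun j => |j - pvG s (-1)|) else []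

def pvRes (n : Int) (s : List Int) : List Int :=
  pvSeg0 s ++ (PySem.List.pyRange 1 (s.length : Int) 1).flatMap (pvGap s) ++ pvSegR n s

def pvCand (n : Int) (s : List Int) : List Int :=
  (s.zip (s.drop 1)).map (fun p => PySem.Int.floordiv (p.2 - p.1) 2)
  ++ (if 0 < pvG s 0 then [pvG s 0] else [])
  ++ (if pvG s (-1) < n then [n - 1 - pvG s (-1)] else [])

lemma pv_A_unfold (n : Int) (c : List Int)
    (hne : PySem.List.sorted c (fun x => x) false ≠ [])
    (hn : n ≠ ((PySem.List.sorted c (fun x => x) false).length : Int)) :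
    flatlandSpaceStations n c
      = (PySem.List.max? (pvRes n (PySem.List.sorted c (fun x => x) false)) (fun x => x)).getD 0 := by
  simp only [flatlandSpaceStations]
  set s := PySem.List.sorted c (fun x => x) false with hsdef
  rw [if_neg hn]
  have hlen1 : (1 : Int) <= (s.length : Int) := by
    have := List.length_pos_of_ne_nil hne; omega
  have h01 : PySem.List.pyRange (0:Int) 1 1 = [0] := by
    simpa using PySem.List.pyRange_one_singleton 0
  have hsplit : PySem.List.pyRange 0 (s.length : Int) 1
      = [0] ++ PySem.List.pyRange 1 (s.length : Int) 1 := by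
    rw [PySem.List.pyRange_one_append 0 1 _ (by norm_num) hlen1, h01]
  rw [hsplit, List.foldl_append]
  -- first iteration (i = 0)
  have hfirst : ([ (0:Int) ]).foldl (fun res i =>
        if i = 0 then
          if 0 < PySem.List.pyGetD s i 0 then
            (PySem.List.pyRange 0 (PySem.List.pyGetD s i 0) 1).foldl
              (fun res j => res ++ [|j - PySem.List.pyGetD s i 0|]) res
          else res
        else
          (PySem.List.pyRange (PySem.List.pyGetD s (i-1) 0) (PySem.List.pyGetD s i 0) 1).foldl
            (fun res j => res ++ [min |j - PySem.List.pyGetD s (i-1) 0| |j - PySem.List.pyGetD s i 0|]) res) []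
      = pvSeg0 s := by
    simp only [List.foldl_cons, List.foldl_nil, if_true]
    unfold pvSeg0 pvG
    split_ifs with h
    · rw [PySem.List.foldl_append_singleton_eq_map]; simp
    · rfl
  rw [hfirst]
  -- remaining iterations (i >= 1)
  have hbody : ∀ (acc : List Int), ∀ i ∈ PySem.List.pyRange 1 (s.length : Int) 1,
      (if i = 0 then
          if 0 < PySem.List.pyGetD s i 0 then
            (PySem.List.pyRange 0 (PySem.List.pyGetD s i 0) 1).foldl
              (fun res j => res ++ [|j - PySem.List.pyGetD s i 0|]) acc
          else acc
        else
          (PySem.List.pyRange (PySem.List.pyGetD s (i-1) 0) (PySem.List.pyGetD s i 0) 1).foldl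
            (fun res j => res ++ [min |j - PySem.List.pyGetD s (i-1) 0| |j - PySem.List.pyGetD s i 0|]) acc)
      = acc ++ pvGap s i := by
    intro acc i hi
    have h1 : 1 ≤ i := (PySem.List.mem_pyRange_one.mp hi).1
    rw [if_neg (by omega)]
    rw [PySem.List.foldl_append_singleton_eq_map]
    rfl
  rw [PySem.List.foldl_congr_mem _ _ (fun acc i => acc ++ pvGap s i) _ hbody,
    PySem.List.foldl_append_eq_flatMap (pvGap s) (PySem.List.pyRange 1 (s.length : Int) 1) (pvSeg0 s)]
  -- trailing segment
  unfold pvRes pvSegR pvG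
  split_ifs with h
  · rw [PySem.List.foldl_append_singleton_eq_map]
  · simp

lemma pv_B_unfold (n : Int) (c : List Int) (hn : n ≠ (c.length : Int)) :
    flatlandSpaceStations_alt n c
      = (PySem.List.max? (pvCand n (PySem.List.sorted c (fun x => x) false)) (fun x => x)).getD 0 := by
  simp only [flatlandSpaceStations_alt]
  rw [if_neg hn]
  unfold pvCand pvG
  split_ifs <;> simp [List.append_assoc]

lemma pv_res_nonneg (n : Int) (s : List Int) : ∀ x ∈ pvRes n s, 0 ≤ x := by
  intro x hx
  simp only [pvRes, List.mem_append, List.mem_flatMap] at hx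
  rcases hx with (hx | ⟨i, _, hx⟩) | hx
  · unfold pvSeg0 at hx
    split at hx
    · obtain ⟨j, _, rfl⟩ := List.mem_map.mp hx; exact abs_nonneg _
    · simp at hx
  · obtain ⟨j, _, rfl⟩ := List.mem_map.mp hx
    exact le_min (abs_nonneg _) (abs_nonneg _)
  · unfold pvSegR at hx
    split at hx
    · obtain ⟨j, _, rfl⟩ := List.mem_map.mp hx; exact abs_nonneg _
    · simp at hx

-- index form of an Int loop index i with 1 ≤ i < len
lemma pv_adj_getElem (s : List Int) (i : Int) (h1 : 1 ≤ i) (h2 : i < (s.length : Int)) :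
    ∃ k : Nat, ∃ h : k + 1 < s.length,
      pvG s (i - 1) = s[k] ∧ pvG s i = s[k + 1] := by
  refine ⟨(i - 1).toNat, by omega, ?_, ?_⟩
  · rw [pvG, PySem.List.pyGetD_eq_getElem s 0 (by omega) (by omega)]
  · rw [pvG, PySem.List.pyGetD_eq_getElem s 0 (by omega) (by omega)]
    congr 1
    omega

lemma pv_zip_mem (s : List Int) (k : Nat) (h : k + 1 < s.length) :
    (s[k], s[k + 1]) ∈ s.zip (s.drop 1) := by
  apply List.mem_iff_getElem.mpr
  refine ⟨k, by simp [List.length_zip]; omega, ?_⟩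
  rw [List.getElem_zip]
  simp

lemma pv_zip_elim (s : List Int) (p : Int × Int) (hp : p ∈ s.zip (s.drop 1)) :
    ∃ k : Nat, ∃ h : k + 1 < s.length, p = (s[k], s[k + 1]) := by
  obtain ⟨k, hk, hval⟩ := List.mem_iff_getElem.mp hp
  have hk' : k + 1 < s.length := by
    simp [List.length_zip] at hk; omega
  refine ⟨k, hk', ?_⟩
  rw [← hval, List.getElem_zip]
  simp

lemma pv_mem_gaps (n : Int) (s : List Int) (k : Nat) (h : k + 1 < s.length)
    (j : Int) (hj1 : s[k] ≤ j) (hj2 : j < s[k + 1]) :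
    min |j - s[k]| |j - s[k + 1]| ∈ pvRes n s := by
  have hga : pvG s (((k + 1 : Nat) : Int) - 1) = s[k] := by
    have he : ((k + 1 : Nat) : Int) - 1 = ((k : Nat) : Int) := by push_cast; ring
    rw [he, pvG, PySem.List.pyGetD_natCast, List.getD_eq_getElem s 0 (by omega)]
  have hgb : pvG s ((k + 1 : Nat) : Int) = s[k + 1] := by
    rw [pvG, PySem.List.pyGetD_natCast, List.getD_eq_getElem s 0 h]
  apply List.mem_append_left
  apply List.mem_append_right
  apply List.mem_flatMap.mpr
  refine ⟨((k + 1 : Nat) : Int),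
    PySem.List.mem_pyRange_one.mpr ⟨by push_cast; omega, by push_cast; omega⟩, ?_⟩
  unfold pvGap
  rw [hga, hgb]
  exact List.mem_map.mpr ⟨j, PySem.List.mem_pyRange_one.mpr ⟨hj1, hj2⟩, rfl⟩

lemma pv_mem_seg0 (n : Int) (s : List Int) (h0 : 0 < pvG s 0) :
    |(0:Int) - pvG s 0| ∈ pvRes n s := by
  apply List.mem_append_left
  apply List.mem_append_left
  unfold pvSeg0
  rw [if_pos h0]
  exact List.mem_map.mpr ⟨0, PySem.List.mem_pyRange_one.mpr ⟨le_refl 0, h0⟩, rfl⟩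

lemma pv_mem_segR (n : Int) (s : List Int) (hlt : pvG s (-1) < n) (j : Int)
    (hj1 : pvG s (-1) ≤ j) (hj2 : j < n) :
    |j - pvG s (-1)| ∈ pvRes n s := by
  apply List.mem_append_right
  unfold pvSegR
  rw [if_pos hlt]
  exact List.mem_map.mpr ⟨j, PySem.List.mem_pyRange_one.mpr ⟨hj1, hj2⟩, rfl⟩

lemma pv_dom1 (n : Int) (s : List Int) :
    ∀ x ∈ pvRes n s, ∃ y ∈ pvCand n s, x ≤ y := by
  intro x hx
  simp only [pvRes, List.mem_append, List.mem_flatMap] at hx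
  rcases hx with (hx | ⟨i, hi, hx⟩) | hx
  · -- first segment: cities left of the first station
    unfold pvSeg0 at hx
    split at hx
    case isTrue h0 =>
      obtain ⟨j, hj, rfl⟩ := List.mem_map.mp hx
      rw [PySem.List.mem_pyRange_one] at hj
      refine ⟨pvG s 0, ?_, ?_⟩
      · exact List.mem_append_left _ (List.mem_append_right _ (by rw [if_pos h0]; simp))
      · rw [abs_of_nonpos (by omega)]; omega
    case isFalse => simp at hx
  · -- a gap between two adjacent stations
    rw [PySem.List.mem_pyRange_one] at hi
    obtain ⟨k, hk, ha, hb⟩ := pv_adj_getElem s i hi.1 hi.2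
    unfold pvGap at hx
    rw [ha, hb] at hx
    obtain ⟨j, hj, rfl⟩ := List.mem_map.mp hx
    rw [PySem.List.mem_pyRange_one] at hj
    refine ⟨PySem.Int.floordiv (s[k + 1] - s[k]) 2, ?_, ?_⟩
    · exact List.mem_append_left _ (List.mem_append_left _
        (List.mem_map.mpr ⟨(s[k], s[k + 1]), pv_zip_mem s k hk, rfl⟩))
    · rw [abs_of_nonneg (by omega), abs_of_nonpos (by omega),
        PySem.Int.le_floordiv_iff_mul_le (by norm_num)]
      omega
  · -- trailing segment: cities right of the last station
    unfold pvSegR at hx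
    split at hx
    case isTrue hlt =>
      obtain ⟨j, hj, rfl⟩ := List.mem_map.mp hx
      rw [PySem.List.mem_pyRange_one] at hj
      refine ⟨n - 1 - pvG s (-1), ?_, ?_⟩
      · exact List.mem_append_right _ (by rw [if_pos hlt]; simp)
      · rw [abs_of_nonneg (by omega)]; omega
    case isFalse => simp at hx

lemma pv_dom2 (n : Int) (s : List Int) (hs : s.Pairwise (· ≤ ·))
    (hres : pvRes n s ≠ []) :
    ∀ y ∈ pvCand n s, ∃ x ∈ pvRes n s, y ≤ x := by
  intro y hy
  simp only [pvCand, List.mem_append] at hy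
  rcases hy with (hy | hy) | hy
  · -- a half-gap candidate
    obtain ⟨p, hp, hfy⟩ := List.mem_map.mp hy
    obtain ⟨k, hk, hpe⟩ := pv_zip_elim s p hp
    subst hpe
    simp only [] at hfy
    rw [← hfy]
    have hab : s[k] ≤ s[k + 1] :=
      List.pairwise_iff_getElem.mp hs k (k + 1) (by omega) hk (by omega)
    by_cases hlt : s[k] < s[k + 1]
    · have hq0 : 0 ≤ PySem.Int.floordiv (s[k + 1] - s[k]) 2 :=
        (PySem.Int.le_floordiv_iff_mul_le (by norm_num)).mpr (by omega)
      have hq2 : PySem.Int.floordiv (s[k + 1] - s[k]) 2 * 2 ≤ s[k + 1] - s[k] :=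
        (PySem.Int.le_floordiv_iff_mul_le (by norm_num)).mp le_rfl
      have hqlt : PySem.Int.floordiv (s[k + 1] - s[k]) 2 < s[k + 1] - s[k] :=
        (PySem.Int.floordiv_lt_iff_lt_mul (by norm_num)).mpr (by omega)
      refine ⟨min |s[k] + PySem.Int.floordiv (s[k + 1] - s[k]) 2 - s[k]|
          |s[k] + PySem.Int.floordiv (s[k + 1] - s[k]) 2 - s[k + 1]|,
        pv_mem_gaps n s k hk _ (by omega) (by omega), ?_⟩
      rw [abs_of_nonneg (by omega), abs_of_nonpos (by omega)]
      omega
    · have heq : s[k + 1] - s[k] = 0 := by omega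
      rw [heq]
      have hz : PySem.Int.floordiv 0 2 = 0 := by decide
      rw [hz]
      obtain ⟨x, hx⟩ := List.exists_mem_of_ne_nil _ hres
      exact ⟨x, hx, pv_res_nonneg n s x hx⟩
  · -- the first-station candidate
    split at hy
    case isTrue h0 =>
      have hy' : y = pvG s 0 := by simpa using hy
      refine ⟨|(0:Int) - pvG s 0|, pv_mem_seg0 n s h0, ?_⟩
      rw [abs_of_nonpos (by omega)]; omega
    case isFalse => simp at hy
  · -- the last-station candidate
    split at hy
    case isTrue hlt =>
      have hy' : y = n - 1 - pvG s (-1) := by simpa using hy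
      refine ⟨|n - 1 - pvG s (-1)|, pv_mem_segR n s hlt (n - 1) (by omega) (by omega), ?_⟩
      rw [abs_of_nonneg (by omega)]; omega
    case isFalse => simp at hy

lemma pv_exists_adj_lt (s : List Int) (hs : s.Pairwise (· ≤ ·)) {x y : Int}
    (hx : x ∈ s) (hy : y ∈ s) (hxy : x < y) :
    ∃ k : Nat, ∃ h : k + 1 < s.length, s[k] < s[k + 1] := by
  by_contra hcon
  simp only [not_exists, not_lt] at hcon
  have hadj : ∀ k, (h : k + 1 < s.length) → s[k] = s[k + 1] := by
    intro k h
    exact le_antisymm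
      (List.pairwise_iff_getElem.mp hs k (k + 1) (by omega) h (by omega))
      (hcon k h)
  have h0 : 0 < s.length := List.length_pos_of_mem hx
  have hconst : ∀ i, (hi : i < s.length) → s[i] = s[0] := by
    intro i
    induction i with
    | zero => intro hi; rfl
    | succ m ih => intro hi; rw [← hadj m hi]; exact ih (by omega)
  obtain ⟨ix, hix, hxe⟩ := List.mem_iff_getElem.mp hx
  obtain ⟨iy, hiy, hye⟩ := List.mem_iff_getElem.mp hy
  have : x = y := by rw [← hxe, ← hye, hconst ix hix, hconst iy hiy]
  omega

lemma pv_res_ne (n : Int) (s : List Int) (hne : s ≠ []) (hs : s.Pairwise (· ≤ ·))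
    (hcond : (∃ x ∈ s, 0 < x) ∨ (∃ x ∈ s, ∃ y ∈ s, x ≠ y) ∨ (∃ x ∈ s, x < n)) :
    pvRes n s ≠ [] := by
  have hlp : 0 < s.length := List.length_pos_of_ne_nil hne
  rcases hcond with ⟨x, hx, hx0⟩ | ⟨x, hx, y, hy, hne'⟩ | ⟨x, hx, hxn⟩
  · by_cases h0 : 0 < pvG s 0
    · exact List.ne_nil_of_mem (pv_mem_seg0 n s h0)
    · have h0' : pvG s 0 = s[0] := by
        rw [pvG, PySem.List.pyGetD_eq_getElem s 0 (by omega) (by omega)]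
        simp
      have hlt : s[0] < x := by omega
      obtain ⟨k, hk, hklt⟩ := pv_exists_adj_lt s hs (List.getElem_mem hlp) hx hlt
      exact List.ne_nil_of_mem (pv_mem_gaps n s k hk s[k] le_rfl hklt)
  · rcases lt_or_gt_of_ne hne' with h | h
    · obtain ⟨k, hk, hklt⟩ := pv_exists_adj_lt s hs hx hy h
      exact List.ne_nil_of_mem (pv_mem_gaps n s k hk s[k] le_rfl hklt)
    · obtain ⟨k, hk, hklt⟩ := pv_exists_adj_lt s hs hy hx h
      exact List.ne_nil_of_mem (pv_mem_gaps n s k hk s[k] le_rfl hklt)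
  · by_cases hlast : pvG s (-1) < n
    · exact List.ne_nil_of_mem (pv_mem_segR n s hlast (pvG s (-1)) le_rfl hlast)
    · have hl' : pvG s (-1) = s.getLast hne := PySem.List.pyGetD_neg_one s 0 hne
      have hlt : x < s.getLast hne := by omega
      obtain ⟨k, hk, hklt⟩ := pv_exists_adj_lt s hs hx (List.getLast_mem hne) hlt
      exact List.ne_nil_of_mem (pv_mem_gaps n s k hk s[k] le_rfl hklt)

lemma pv_max_eq (n : Int) (s : List Int) (hs : s.Pairwise (· ≤ ·))
    (hres : pvRes n s ≠ []) :
    (PySem.List.max? (pvRes n s) (fun x => x)).getD 0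
      = (PySem.List.max? (pvCand n s) (fun x => x)).getD 0 := by
  obtain ⟨mA, hmA⟩ : ∃ m, PySem.List.max? (pvRes n s) (fun x => x) = some m := by
    cases h : PySem.List.max? (pvRes n s) (fun x => x) with
    | none => exact absurd ((PySem.List.max?_eq_none_iff _ _).mp h) hres
    | some m => exact ⟨m, rfl⟩
  obtain ⟨y, hy, hAy⟩ := pv_dom1 n s mA (PySem.List.max?_mem hmA)
  have hcand : pvCand n s ≠ [] := List.ne_nil_of_mem hy
  obtain ⟨mB, hmB⟩ : ∃ m, PySem.List.max? (pvCand n s) (fun x => x) = some m := by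
    cases h : PySem.List.max? (pvCand n s) (fun x => x) with
    | none => exact absurd ((PySem.List.max?_eq_none_iff _ _).mp h) hcand
    | some m => exact ⟨m, rfl⟩
  rw [hmA, hmB]
  simp only [Option.getD_some]
  apply le_antisymm
  · exact le_trans hAy (PySem.List.max?_isMax hmB y hy)
  · obtain ⟨x, hx, hBx⟩ := pv_dom2 n s hs hres mB (PySem.List.max?_mem hmB)
    exact le_trans hBx (PySem.List.max?_isMax hmA x hx)

-- ===== VERDICT (by name: the statement is the Claim_ definition above) =====
theorem flatlandSpaceStations_spec : Claim_equal_flatlandSpaceStations := by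
  intro n c _ hpre
  unfold Spec_flatlandSpaceStations
  by_cases hlen : n = (c.length : Int)
  · simp only [flatlandSpaceStations, flatlandSpaceStations_alt, PySem.List.length_sorted,
      if_pos hlen]
  · have hc : c ≠ [] := by
      intro h; subst h; simp at hlen; exact hlen (hpre.1 rfl)
    have hne : PySem.List.sorted c (fun x => x) false ≠ [] := by
      simpa [PySem.List.sorted_eq_nil_iff] using hc
    have hs : (PySem.List.sorted c (fun x => x) false).Pairwise (· ≤ ·) := by
      simpa using PySem.List.sorted_pairwise c (fun x => x)
    have hn' : n ≠ ((PySem.List.sorted c (fun x => x) false).length : Int) := by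
      rw [PySem.List.length_sorted]; exact hlen
    have hcond : (∃ x ∈ PySem.List.sorted c (fun x => x) false, 0 < x)
        ∨ (∃ x ∈ PySem.List.sorted c (fun x => x) false,
            ∃ y ∈ PySem.List.sorted c (fun x => x) false, x ≠ y)
        ∨ (∃ x ∈ PySem.List.sorted c (fun x => x) false, x < n) := by
      rcases hpre.2 hc with h | h | h | h
      · exact absurd h hlen
      · exact Or.inl (by simpa [PySem.List.mem_sorted] using h)
      · exact Or.inr (Or.inl (by simpa [PySem.List.mem_sorted] using h))
      · exact Or.inr (Or.inr (by simpa [PySem.List.mem_sorted] using h))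
    rw [pv_A_unfold n c hne hn', pv_B_unfold n c hlen,
      pv_max_eq n _ hs (pv_res_ne n _ hne hs hcond)]
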